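-- pv_equiv track=rewrite | github.com/ajnirp/binarysearch | consecutive-ones.py | solve
-- ===== SOURCE A (Python) =====
-- def solve(nums):
--     seen_block = False
--     block_over = False
--     for idx in range(len(nums)):
--         if seen_block:
--             if nums[idx] != 1:
--                 block_over = True
--                 seen_block = False
--         else:
--             if nums[idx] == 1:
--                 if block_over:
--                     return False
--                 else:
--                     seen_block = True
--     return True
-- ===== SOURCE B (Python) =====
-- def solve(nums):
--     # Phase 1: skip the prefix of non-ones; Phase 2: skip the block of ones;
--     # Phase 3: the remainder must contain no 1.
--     i = 0
--     n = len(nums)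
--     while i < n and nums[i] != 1:
--         i += 1
--     while i < n and nums[i] == 1:
--         i += 1
--     return all(x != 1 for x in nums[i:])
-- ===== Notes on version B (the rewrite author's own statement) =====
-- stated objective: simpler
-- what changed: Replaced the two-boolean state machine with a three-phase scan: skip leading non-ones, skip the block of ones, then verify no 1 remains.
import Mathlib
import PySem

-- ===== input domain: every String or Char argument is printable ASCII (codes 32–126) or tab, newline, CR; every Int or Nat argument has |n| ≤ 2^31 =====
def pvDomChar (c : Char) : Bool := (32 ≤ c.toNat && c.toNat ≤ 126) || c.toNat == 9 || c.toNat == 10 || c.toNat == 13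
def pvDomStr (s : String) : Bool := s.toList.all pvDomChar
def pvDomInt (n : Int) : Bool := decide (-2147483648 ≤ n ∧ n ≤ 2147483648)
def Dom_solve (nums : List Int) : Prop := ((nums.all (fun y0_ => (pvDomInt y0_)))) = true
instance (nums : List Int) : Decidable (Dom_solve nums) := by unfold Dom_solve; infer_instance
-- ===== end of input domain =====

-- B replaces A's two-boolean state machine with a three-phase scan (skip non-ones, skip the block of ones, check no 1 remains); same O(n) cost, simpler.


-- ===== PORT A =====
-- state machine ovr the list: (seen_block, block_over), early return False becomes 'false'
def solveAux : List Int → Bool → Bool → Bool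
  | [], _, _ => true
  | x :: xs, seen, ovr =>
    if seen then
      if x != 1 then solveAux xs false true
      else solveAux xs true ovr
    else
      if x == 1 then
        (if ovr then false else solveAux xs true ovr)
      else solveAux xs seen ovr

def solve (nums : List Int) : Bool := solveAux nums false false

-- ===== PORT B =====
-- phase 1 and 2 (index-advancing while loops) are dropWhile; phase 3 is 'all'
def solve_alt (nums : List Int) : Bool :=
  (((nums.dropWhile (fun x => x ≠ 1)).dropWhile (fun x => x = 1)).all (fun x => x ≠ 1))

-- ===== PRECONDITION & SPEC =====
def Spec_solve (nums : List Int) (out : Bool) : Prop := out = solve_alt nums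
instance (nums : List Int) (out : Bool) : Decidable (Spec_solve nums out) := by unfold Spec_solve; infer_instance

-- ===== CLAIM (what is proved, stated in full; the proofs are below) =====
def Claim_equal_solve : Prop := ∀ (nums : List Int), Dom_solve nums → Spec_solve nums (solve nums)

-- ===== LEMMAS AND PROOFS =====

-- state (false, true): a 1 anywhere fails
theorem solveAux_false_true (xs : List Int) :
    solveAux xs false true = xs.all (fun x => x ≠ 1) := by
  induction xs with
  | nil => rfl
  | cons x xs ih =>
    by_cases h : x = 1 <;> simp [solveAux, h, ih]

-- state (true, false): consume the block of ones, then no 1 may remain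
theorem solveAux_true_false (xs : List Int) :
    solveAux xs true false = (xs.dropWhile (fun x => x = 1)).all (fun x => x ≠ 1) := by
  induction xs with
  | nil => rfl
  | cons x xs ih =>
    by_cases h : x = 1
    · simp [solveAux, h, ih, List.dropWhile]
    · simp [solveAux, h, List.dropWhile, solveAux_false_true]

-- state (false, false): skip non-ones
theorem solveAux_false_false (xs : List Int) :
    solveAux xs false false = solve_alt xs := by
  induction xs with
  | nil => rfl
  | cons x xs ih =>
    by_cases h : x = 1
    · simp [solveAux, h, solve_alt, List.dropWhile, solveAux_true_false]
    · simpa [solveAux, h, solve_alt, List.dropWhile] using ih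

-- ===== VERDICT (by name: the statement is the Claim_ definition above) =====
theorem solve_spec : Claim_equal_solve := by
  intro nums _
  show solve nums = solve_alt nums
  exact solveAux_false_false nums
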